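-- pv_equiv track=rewrite | github.com/OliverDayunLiu/ZebraFishSideProject | scripts/peak_interval.py | get_peaks
-- ===== SOURCE A (Python) =====
-- def check_fake(values, i):
--     fake_interval = 3
--     left = max(i - fake_interval, 0)
--     right = min(i + fake_interval, len(values))
--     fake = False
--     for j in range(left, right + 1):
--         if values[j] > values[i]:
--             fake = True
--             break
--     return fake
--
-- def get_peaks(time, values):
--     time_array = []
--     for i in range(1, len(time)-1):
--         if values[i] > values[i-1] and values[i] > values[i+1]:
--             if check_fake(values, i) is False:
--                 time_array.append(time[i])
--         elif values[i] == values[i-1] and values[i] > values[i+1]: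
--             last_number = values[i-1]
--             for j in range(i-1, -1, -1):
--                 if values[j] != last_number:
--                     if values[j] < last_number:
--                         if check_fake(values, i) is False:
--                             time_array.append(time[i])
--                             break
--                     break
--     return time_array
-- ===== SOURCE B (Python) =====
-- def get_peaks(time, values):
--     m = len(values)
--     # nearest left differing value per index, one forward pass
--     pd = [None] * m
--     for i in range(1, m):
--         pd[i] = values[i - 1] if values[i - 1] != values[i] else pd[i - 1]
--     out = []
--     for i in range(1, len(time) - 1):
--         v = values[i]
--         if v > values[i + 1] and (v > values[i - 1] or
--                 (v == values[i - 1] and pd[i] is not None and pd[i] < v)):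
--             lo = max(i - 3, 0)
--             hi = min(i + 3, m - 1)
--             if all(values[j] <= v for j in range(lo, hi + 1)):
--                 out.append(time[i])
--     return out
-- ===== Notes on version B (the rewrite author's own statement) =====
-- stated objective: alternative
-- what changed: B replaces A's backward per-index plateau rescan with a single forward pass precomputing the nearest-left distinct value per index, and replaces check_fake's raise-prone scan with a bounded 7-element window max test; it trades A's worst-case quadratic rescans for one extra linear pass.
-- outside the precondition, e.g. on get_peaks([1, 2, 3], [5, 1]): A returns [], B raises IndexError
import Mathlib
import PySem

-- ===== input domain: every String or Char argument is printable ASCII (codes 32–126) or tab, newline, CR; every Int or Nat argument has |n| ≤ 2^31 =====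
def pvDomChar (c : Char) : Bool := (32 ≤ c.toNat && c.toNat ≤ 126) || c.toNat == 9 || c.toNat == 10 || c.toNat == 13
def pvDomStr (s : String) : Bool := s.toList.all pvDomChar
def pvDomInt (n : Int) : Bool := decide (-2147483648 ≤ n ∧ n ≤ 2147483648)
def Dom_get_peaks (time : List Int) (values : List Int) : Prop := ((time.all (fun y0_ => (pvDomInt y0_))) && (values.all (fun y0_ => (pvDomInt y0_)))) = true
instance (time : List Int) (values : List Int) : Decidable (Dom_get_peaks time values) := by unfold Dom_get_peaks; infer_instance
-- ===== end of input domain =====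

-- B replaces A's backward per-index plateau rescan by one forward pass precomputing the
-- nearest-left distinct value, and tests a bounded window instead of check_fake's scan
-- (objective: alternative algorithm of similar measured cost).

-- ===== PORT A =====
-- the j-loop of check_fake; Python raises IndexError where pyGet? is none (outside Pre_)
def checkFakeLoop (values : List Int) (vi : Int) : List Int → Bool
  | [] => false
  | j :: js =>
    match PySem.List.pyGet? values j with
    | none => true
    | some vj => if vi < vj then true else checkFakeLoop values vi js

def check_fake (values : List Int) (i : Int) : Bool :=
  let left := max (i - 3) 0
  let right := min (i + 3) (values.length : Int)
  checkFakeLoop values (PySem.List.pyGetD values i 0) (PySem.List.pyRange left (right + 1) 1)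

-- the backward j-loop of the elif branch: true = append time[i]
def plateauScan (values : List Int) (i : Int) (last : Int) : List Int → Bool
  | [] => false
  | j :: js =>
    let vj := PySem.List.pyGetD values j 0
    if vj ≠ last then
      (if vj < last then !(check_fake values i) else false)
    else plateauScan values i last js

def get_peaks (time : List Int) (values : List Int) : List Int :=
  (PySem.List.pyRange 1 ((time.length : Int) - 1) 1).foldl (fun acc i =>
    let vi := PySem.List.pyGetD values i 0
    let vm := PySem.List.pyGetD values (i - 1) 0
    let vp := PySem.List.pyGetD values (i + 1) 0
    if vm < vi ∧ vp < vi then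
      (if check_fake values i = false then acc ++ [PySem.List.pyGetD time i 0] else acc)
    else if vi = vm ∧ vp < vi then
      (if plateauScan values i vm (PySem.List.pyRange (i - 1) (-1) (-1)) then
        acc ++ [PySem.List.pyGetD time i 0]
      else acc)
    else acc) []

-- ===== PORT B =====
-- pd list: pd[i] = nearest value to the left of i that differs from values[i] (one forward pass)
def pdAux (prev : Int) (pprev : Option Int) : List Int → List (Option Int)
  | [] => []
  | v :: vs =>
    let cur := if prev ≠ v then some prev else pprev
    cur :: pdAux v cur vs

def pdList : List Int → List (Option Int)
  | [] => []
  | v :: vs => none :: pdAux v none vs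

def get_peaks_alt (time : List Int) (values : List Int) : List Int :=
  let m := (values.length : Int)
  let pds := pdList values
  (PySem.List.pyRange 1 ((time.length : Int) - 1) 1).foldl (fun acc i =>
    let v := PySem.List.pyGetD values i 0
    let ok : Bool :=
      decide (PySem.List.pyGetD values (i + 1) 0 < v) &&
        (decide (PySem.List.pyGetD values (i - 1) 0 < v) ||
          (decide (v = PySem.List.pyGetD values (i - 1) 0) &&
            (match PySem.List.pyGetD pds i none with
             | some p => decide (p < v)
             | none => false)))
    if ok then
      (if (PySem.List.pyRange (max (i - 3) 0) (min (i + 3) (m - 1) + 1) 1).all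
            (fun j => decide (PySem.List.pyGetD values j 0 ≤ v)) then
        acc ++ [PySem.List.pyGetD time i 0]
      else acc)
    else acc) []

-- ===== PRECONDITION & SPEC =====
-- true iff A's loop body calls check_fake at index i (a strict peak, or a left plateau
-- whose nearest differing value on the left is smaller)
def calledB (values : List Int) (i : Nat) : Bool :=
  decide (values.getD (i+1) 0 < values.getD i 0 ∧
    (values.getD (i-1) 0 < values.getD i 0 ∨
      (values.getD i 0 = values.getD (i-1) 0 ∧
        ∃ j < i, values.getD j 0 < values.getD i 0 ∧
          ∀ k < i, j < k → values.getD k 0 = values.getD i 0)))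

-- Pre_ excludes exactly the inputs on which A raises IndexError (check_fake indexing
-- values[len(values)] at a window-dominating candidate peak near the right end, or
-- values shorter than time with the loop touching a missing index), plus the rare inputs
-- with values shorter than time on which A happens to return (B indexes values[i+1] there).
def Pre_get_peaks (time : List Int) (values : List Int) : Prop :=
  time.length ≤ 2 ∨ (time.length ≤ values.length ∧
    ∀ i < time.length - 1, 1 ≤ i → values.length ≤ i + 3 → calledB values i = true →
      ∃ j < values.length, i - 3 ≤ j ∧ values.getD i 0 < values.getD j 0)

instance (time : List Int) (values : List Int) : Decidable (Pre_get_peaks time values) := by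
  unfold Pre_get_peaks; infer_instance

def pvWitness_get_peaks : List Int × List Int := ([0, 1, 2, 3, 4, 5, 6], [0, 9, 0, 0, 0, 0, 0])

def Spec_get_peaks (time : List Int) (values : List Int) (out : List Int) : Prop := out = get_peaks_alt time values
instance (time : List Int) (values : List Int) (out : List Int) : Decidable (Spec_get_peaks time values out) := by unfold Spec_get_peaks; infer_instance

-- ===== CLAIM (what is proved, stated in full; the proofs are below) =====
def Claim_equal_get_peaks : Prop := ∀ (time : List Int) (values : List Int), Dom_get_peaks time values → Pre_get_peaks time values → Spec_get_peaks time values (get_peaks time values)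


-- ===== LEMMAS AND PROOFS =====

-- first element ≠ last scanning a reversed prefix
def firstDiffL (last : Int) : List Int → Option Int
  | [] => none
  | x :: xs => if x ≠ last then some x else firstDiffL last xs

theorem take_succ_reverse (l : List Int) (k : Nat) (hk : k < l.length) :
    (l.take (k+1)).reverse = l.getD k 0 :: (l.take k).reverse := by
  rw [List.take_add_one]
  simp [List.getD, List.getElem?_eq_getElem hk]

theorem pyGet?_eq_some_getD (values : List Int) (j : Int) (h0 : 0 ≤ j) (h1 : j < (values.length : Int)) :
    PySem.List.pyGet? values j = some (PySem.List.pyGetD values j 0) := by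
  obtain ⟨n, rfl⟩ := Int.eq_ofNat_of_zero_le h0
  rw [PySem.List.pyGet?_natCast, PySem.List.pyGetD_natCast]
  have hn : n < values.length := by exact_mod_cast h1
  simp [List.getD, List.getElem?_eq_getElem hn]

theorem cfLoop_all (values : List Int) (vi : Int) (js : List Int)
    (h : ∀ j ∈ js, 0 ≤ j ∧ j < (values.length : Int)) :
    checkFakeLoop values vi js = !(js.all (fun j => decide (PySem.List.pyGetD values j 0 ≤ vi))) := by
  induction js with
  | nil => simp [checkFakeLoop]
  | cons j js ih =>
    obtain ⟨h0, h1⟩ := h j (by simp)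
    rw [List.all_cons]
    simp only [checkFakeLoop, pyGet?_eq_some_getD values j h0 h1]
    by_cases hlt : vi < PySem.List.pyGetD values j 0
    · simp [hlt, not_le.mpr hlt]
    · simp only [if_neg hlt]
      rw [ih (fun x hx => h x (List.mem_cons_of_mem _ hx))]
      simp [not_lt.mp hlt]

theorem cfLoop_oob (values : List Int) (vi : Int) (js : List Int) (j0 : Int)
    (h : PySem.List.pyGet? values j0 = none) :
    checkFakeLoop values vi (js ++ [j0]) = true := by
  induction js with
  | nil => simp [checkFakeLoop, h]
  | cons j js ih =>
    simp only [List.cons_append, checkFakeLoop]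
    cases hg : PySem.List.pyGet? values j with
    | none => rfl
    | some vj => by_cases hlt : vi < vj <;> simp [hlt, ih]

theorem cf_out (values : List Int) (n : Nat) (hn : n < values.length)
    (hm : (values.length : Int) ≤ (n : Int) + 3) :
    check_fake values (n : Int) = true := by
  unfold check_fake
  have h1 : min ((n : Int) + 3) (values.length : Int) = (values.length : Int) := by omega
  have h2 : max ((n : Int) - 3) 0 ≤ (values.length : Int) := by omega
  dsimp only
  rw [h1, PySem.List.pyRange_one_succ_right h2]
  apply cfLoop_oob
  rw [show ((values.length : Int)) = ((values.length : Nat) : Int) from rfl, PySem.List.pyGet?_natCast]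
  simp

theorem plateauScan_eq_firstDiffL (values : List Int) (i last : Int) (k : Nat)
    (hk : k < values.length) :
    plateauScan values i last (PySem.List.pyRange (k : Int) (-1) (-1)) =
      (match firstDiffL last ((values.take (k+1)).reverse) with
       | none => false
       | some p => if p < last then !(check_fake values i) else false) := by
  induction k with
  | zero =>
    simp only [Nat.cast_zero]
    rw [PySem.List.pyRange_neg_one_cons (by omega : (-1:Int) < 0)]
    rw [take_succ_reverse values 0 hk]
    rw [show ((0:Int) - 1) = -1 from rfl, PySem.List.pyRange_neg_one_eq_nil (le_refl _)]
    simp only [plateauScan, firstDiffL, List.take_zero, List.reverse_nil]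
    rw [show ((0:Int)) = ((0:Nat) : Int) from rfl, PySem.List.pyGetD_natCast]
    by_cases h : values.getD 0 0 = last
    all_goals simp only [List.getD] at h; simp [h]
  | succ k ih =>
    simp only [Nat.cast_add, Nat.cast_one]
    rw [PySem.List.pyRange_neg_one_cons (by omega : (-1:Int) < ((k:Int)+1))]
    rw [take_succ_reverse values (k+1) hk]
    simp only [plateauScan, firstDiffL]
    rw [show ((k:Int)+1) = (((k+1 : Nat)) : Int) by push_cast; ring, PySem.List.pyGetD_natCast]
    rw [show ((((k+1 : Nat)) : Int) - 1) = ((k : Nat) : Int) by push_cast; ring]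
    rw [ih (by omega)]
    by_cases h : values.getD (k+1) 0 = last
    all_goals simp only [List.getD] at h; simp [h]

theorem pdAux_getD (vs : List Int) (p : Int) (rpre : List Int) (k : Nat) (hk : k < vs.length) :
    (pdAux p (firstDiffL p rpre) vs).getD k none =
      firstDiffL (vs.getD k 0) ((vs.take k).reverse ++ p :: rpre) := by
  induction vs generalizing p rpre k with
  | nil => simp at hk
  | cons v vs ih =>
    have hcur : (if p ≠ v then some p else firstDiffL p rpre) = firstDiffL v (p :: rpre) := by
      by_cases h : p = v
      · subst h; simp [firstDiffL]
      · simp [firstDiffL, h]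
    cases k with
    | zero =>
      simp only [pdAux, List.getD, List.take_zero, List.reverse_nil, List.nil_append]
      simpa using hcur
    | succ k =>
      simp only [pdAux]
      have : ((v :: vs).take (k+1)).reverse ++ p :: rpre = (vs.take k).reverse ++ v :: p :: rpre := by
        simp [List.take_succ_cons]
      rw [show ((v :: vs).getD (k+1) 0) = vs.getD k 0 from rfl, this]
      rw [show ((if p ≠ v then some p else firstDiffL p rpre) :: pdAux v (if p ≠ v then some p else firstDiffL p rpre) vs).getD (k+1) none = (pdAux v (if p ≠ v then some p else firstDiffL p rpre) vs).getD k none from rfl]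
      rw [hcur]
      exact ih v (p :: rpre) k (by simpa using hk)

theorem pdList_getD (values : List Int) (n : Nat) (hn : n < values.length) :
    (pdList values).getD n none =
      (match n with
       | 0 => none
       | k+1 => firstDiffL (values.getD (k+1) 0) ((values.take (k+1)).reverse)) := by
  cases values with
  | nil => simp at hn
  | cons v vs =>
    cases n with
    | zero => rfl
    | succ k =>
      simp only [pdList]
      rw [show ((none : Option Int) :: pdAux v none vs).getD (k+1) none = (pdAux v none vs).getD k none from rfl]
      have H := pdAux_getD vs v [] k (by simpa using hn)
      rw [show firstDiffL v ([] : List Int) = none from rfl] at H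
      rw [H]
      have h1 : ((v :: vs).take (k+1)).reverse = (vs.take k).reverse ++ [v] := by
        simp [List.take_succ_cons]
      rw [show ((v :: vs).getD (k+1) 0) = vs.getD k 0 from rfl, h1]

theorem firstDiffL_some (values : List Int) (last p : Int) (n : Nat) (hn : n ≤ values.length)
    (h : firstDiffL last ((values.take n).reverse) = some p) :
    ∃ j < n, values.getD j 0 = p ∧ p ≠ last ∧ ∀ k < n, j < k → values.getD k 0 = last := by
  induction n with
  | zero => simp [firstDiffL] at h
  | succ n ih =>
    rw [take_succ_reverse values n (by omega)] at h
    simp only [firstDiffL] at h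
    by_cases hd : values.getD n 0 = last
    · rw [if_neg (not_not_intro hd)] at h
      obtain ⟨j, hj, hv, hne, hall⟩ := ih (by omega) h
      exact ⟨j, by omega, hv, hne, fun k hk hjk => by
        rcases Nat.lt_succ_iff_lt_or_eq.mp hk with h1 | h1
        · exact hall k h1 hjk
        · subst h1; exact hd⟩
    · rw [if_pos hd] at h
      have hp := Option.some.inj h
      exact ⟨n, Nat.lt_succ_self n, hp, hp ▸ hd, fun k hk hjk => by omega⟩

theorem win_false (values : List Int) (k j : Nat) (hj : j < values.length)
    (hj3 : k + 1 - 3 ≤ j) (hjv : values.getD (k+1) 0 < values.getD j 0)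
    (hm : values.length ≤ k + 4) :
    ((PySem.List.pyRange (max (((k+1 : Nat) : Int) - 3) 0)
        (min (((k+1 : Nat) : Int) + 3) ((values.length : Int) - 1) + 1) 1).all
      (fun jj => decide (PySem.List.pyGetD values jj 0 ≤ values.getD (k+1) 0))) = false := by
  rw [List.all_eq_false]
  refine ⟨(j : Int), PySem.List.mem_pyRange_one.mpr ⟨by push_cast; omega, by push_cast; omega⟩, ?_⟩
  rw [PySem.List.pyGetD_natCast]
  simp only [List.getD_eq_getElem?_getD] at hjv
  simp [hjv, not_le, List.getD_eq_getElem?_getD]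

theorem cf_in (values : List Int) (k : Nat) (h : (((k+1 : Nat)) : Int) + 3 < values.length) :
    check_fake values ((k+1 : Nat) : Int) =
      !((PySem.List.pyRange (max (((k+1 : Nat) : Int) - 3) 0)
          (min (((k+1 : Nat) : Int) + 3) ((values.length : Int) - 1) + 1) 1).all
        (fun j => decide (PySem.List.pyGetD values j 0 ≤ values.getD (k+1) 0))) := by
  unfold check_fake
  dsimp only
  rw [show min ((((k+1 : Nat)) : Int) + 3) (values.length : Int) = (((k+1 : Nat)) : Int) + 3 by omega]
  rw [show min ((((k+1 : Nat)) : Int) + 3) ((values.length : Int) - 1) = (((k+1 : Nat)) : Int) + 3 by omega]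
  rw [PySem.List.pyGetD_natCast]
  apply cfLoop_all
  intro j hjmem
  rw [PySem.List.mem_pyRange_one] at hjmem
  exact ⟨by omega, by omega⟩

theorem get_peaks_spec : Claim_equal_get_peaks := by
  intro time values _ hpre
  unfold Spec_get_peaks get_peaks get_peaks_alt
  dsimp only
  apply PySem.List.foldl_congr_mem
  intro acc i hi
  rw [PySem.List.mem_pyRange_one] at hi
  rcases hpre with hsmall | ⟨htm, hclause⟩
  · exfalso; omega
  obtain ⟨n, rfl⟩ := Int.eq_ofNat_of_zero_le (by omega : (0:Int) ≤ i)
  obtain ⟨k, rfl⟩ : ∃ k, n = k + 1 := ⟨n - 1, by omega⟩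
  have hkt : k + 1 < time.length := by omega
  have hkm1 : k + 1 < values.length := by omega
  have e1 : (((k+1:Nat)) : Int) - 1 = ((k : Nat) : Int) := by push_cast; ring
  have e2 : (((k+1:Nat)) : Int) + 1 = (((k+2 : Nat)) : Int) := by push_cast; ring
  rw [e1, e2]
  rw [show PySem.List.pyGetD (pdList values) ((k+1 : Nat) : Int) none = (pdList values).getD (k+1) none from PySem.List.pyGetD_natCast _ _ _]
  rw [pdList_getD values (k+1) hkm1]
  simp only [PySem.List.pyGetD_natCast]
  have hcall : ∀ (hvp : values.getD (k+2) 0 < values.getD (k+1) 0)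
      (hside : values.getD k 0 < values.getD (k+1) 0 ∨
        (values.getD (k+1) 0 = values.getD k 0 ∧
          ∃ j < k+1, values.getD j 0 < values.getD (k+1) 0 ∧
            ∀ k' < k+1, j < k' → values.getD k' 0 = values.getD (k+1) 0)),
      calledB values (k+1) = true := by
    intro hvp hside
    unfold calledB
    rw [decide_eq_true_eq]
    refine ⟨by simpa using hvp, ?_⟩
    simpa [Nat.add_sub_cancel] using hside
  have hwin : ∀ (hm3 : values.length ≤ k + 4) (hc : calledB values (k+1) = true),
      ((PySem.List.pyRange (max (((k+1 : Nat) : Int) - 3) 0)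
          (min (((k+1 : Nat) : Int) + 3) ((values.length : Int) - 1) + 1) 1).all
        (fun j => decide (PySem.List.pyGetD values j 0 ≤ values.getD (k+1) 0))) = false := by
    intro hm3 hc
    obtain ⟨j, hj, hj3, hjv⟩ := hclause (k+1) (by omega) (by omega) (by omega) hc
    exact win_false values k j hj hj3 hjv hm3
  by_cases hvp : values.getD (k+2) 0 < values.getD (k+1) 0
  · by_cases hvm : values.getD k 0 < values.getD (k+1) 0
    · -- strict peak
      rw [if_pos ⟨hvm, hvp⟩]
      rw [decide_eq_true hvp, decide_eq_true hvm]
      rw [show ((true && (true || (decide (values.getD (k+1) 0 = values.getD k 0) &&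
            match firstDiffL (values.getD (k+1) 0) ((values.take (k+1)).reverse) with
            | some p => decide (p < values.getD (k+1) 0)
            | none => false))) : Bool) = true from rfl]
      rw [if_pos rfl]
      by_cases hm3 : values.length ≤ k + 4
      · rw [cf_out values (k+1) hkm1 (by push_cast; omega)]
        rw [hwin hm3 (hcall hvp (Or.inl hvm))]
        simp
      · rw [cf_in values k (by push_cast; omega)]
        cases hw : ((PySem.List.pyRange (max (((k+1 : Nat) : Int) - 3) 0)
            (min (((k+1 : Nat) : Int) + 3) ((values.length : Int) - 1) + 1) 1).all
          (fun j => decide (PySem.List.pyGetD values j 0 ≤ values.getD (k+1) 0))) <;> simp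
    · rw [if_neg (by tauto)]
      by_cases hveq : values.getD (k+1) 0 = values.getD k 0
      · -- plateau
        rw [if_pos ⟨hveq, hvp⟩]
        rw [plateauScan_eq_firstDiffL values ((k+1 : Nat) : Int) (values.getD k 0) k (by omega)]
        rw [← hveq]
        rw [decide_eq_true hvp, decide_eq_false (lt_irrefl (values.getD (k+1) 0)),
          decide_eq_true (rfl : values.getD (k+1) 0 = values.getD (k+1) 0)]
        rw [show ((true && (false || (true &&
            match firstDiffL (values.getD (k+1) 0) ((values.take (k+1)).reverse) with
            | some p => decide (p < values.getD (k+1) 0)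
            | none => false))) : Bool) =
          (match firstDiffL (values.getD (k+1) 0) ((values.take (k+1)).reverse) with
            | some p => decide (p < values.getD (k+1) 0)
            | none => false) from rfl]
        cases hfd : firstDiffL (values.getD (k+1) 0) ((values.take (k+1)).reverse) with
        | none => simp
        | some p =>
          dsimp only
          by_cases hp : p < values.getD (k+1) 0
          · have hcalled : calledB values (k+1) = true := by
              obtain ⟨j, hjlt, hjval, _, hall⟩ :=
                firstDiffL_some values (values.getD (k+1) 0) p (k+1) (by omega) hfd
              exact hcall hvp (Or.inr ⟨hveq, j, hjlt, by rw [hjval]; exact hp, hall⟩)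
            by_cases hm3 : values.length ≤ k + 4
            · rw [cf_out values (k+1) hkm1 (by push_cast; omega)]
              rw [hwin hm3 hcalled]
              simp
            · rw [cf_in values k (by push_cast; omega)]
              cases hw : ((PySem.List.pyRange (max (((k+1 : Nat) : Int) - 3) 0)
                  (min (((k+1 : Nat) : Int) + 3) ((values.length : Int) - 1) + 1) 1).all
                (fun j => decide (PySem.List.pyGetD values j 0 ≤ values.getD (k+1) 0))) <;> simp
          · simp only [List.getD_eq_getElem?_getD] at hp
            simp [hp]
      · rw [if_neg (by tauto)]
        rw [decide_eq_false hveq]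
        rw [show ((decide (values.getD (k+2) 0 < values.getD (k+1) 0) &&
            (decide (values.getD k 0 < values.getD (k+1) 0) || (false &&
            match firstDiffL (values.getD (k+1) 0) ((values.take (k+1)).reverse) with
            | some p => decide (p < values.getD (k+1) 0)
            | none => false))) : Bool) = (decide (values.getD (k+2) 0 < values.getD (k+1) 0) &&
            (decide (values.getD k 0 < values.getD (k+1) 0) || false)) from rfl]
        rw [decide_eq_false hvm]
        simp
  · rw [if_neg (by tauto), if_neg (by tauto)]
    rw [decide_eq_false hvp]
    simp
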